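-- pv_equiv track=rewrite | github.com/joqjoq966/Algorithm_python | Codeforces/Educational Round 103/a.py | solve
-- ===== SOURCE A (Python) =====
-- def solve(n,k):
--     ans = 0
--     if k==1 or n%k==0:
--         return 1
--     while n>k:
--         k+=k
--     if k%n==0:
--         ans += k//n
--     else:
--         ans += k//n +1
--
--     return ans
-- ===== SOURCE B (Python) =====
-- def solve(n, k):
--     if k == 1 or n % k == 0:
--         return 1
--     if n > k:
--         q = -(-n // k)                      # ceil(n / k)
--         k *= 2 ** (q - 1).bit_length()      # smallest power of two with k*2**m >= n
--     return -(-k // n)                       # ceil(k / n)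
-- ===== Notes on version B (the rewrite author's own statement) =====
-- stated objective: simpler
-- what changed: Replaces the doubling while-loop by a closed-form computation: the number of doublings is bit_length(ceil(n/k)-1), and the final if/else on k%n becomes a single ceiling division -(-k//n).
import Mathlib
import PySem

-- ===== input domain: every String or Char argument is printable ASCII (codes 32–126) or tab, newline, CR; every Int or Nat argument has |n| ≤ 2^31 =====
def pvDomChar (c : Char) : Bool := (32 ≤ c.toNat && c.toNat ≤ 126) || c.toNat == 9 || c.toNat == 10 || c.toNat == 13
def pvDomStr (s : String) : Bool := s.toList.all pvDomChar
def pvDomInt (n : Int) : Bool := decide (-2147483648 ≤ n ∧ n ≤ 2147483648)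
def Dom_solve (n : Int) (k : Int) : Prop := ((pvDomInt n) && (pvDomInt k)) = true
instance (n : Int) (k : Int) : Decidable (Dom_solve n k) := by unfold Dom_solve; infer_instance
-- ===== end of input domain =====

-- B replaces A's doubling while-loop by a closed-form bit_length computation and a single ceiling division (simpler).


-- ===== PORT A =====
-- the 'while n > k: k += k' loop; the '0 < k' conjunct is a totality guard only
-- (for k ≤ 0 with k < n the Python loop never terminates; Pre_solve excludes those inputs)
def loopA (n k : Int) : Int :=
  if _h : k < n ∧ 0 < k then loopA n (k + k) else k
termination_by (n - k).toNat
decreasing_by omega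

def solve (n : Int) (k : Int) : Int :=
  if k == 1 || PySem.Int.mod n k == 0 then 1
  else
    let k' := loopA n k
    if PySem.Int.mod k' n == 0 then 0 + PySem.Int.floordiv k' n
    else 0 + (PySem.Int.floordiv k' n + 1)

-- ===== PORT B =====
def solve_alt (n : Int) (k : Int) : Int :=
  if k == 1 || PySem.Int.mod n k == 0 then 1
  else
    let k2 : Int :=
      (if k < n then
        (let q := -(PySem.Int.floordiv (-n) k)
         k * 2 ^ PySem.Int.bitLength (q - 1))
      else k)
    (-(PySem.Int.floordiv (-k2) n))

-- ===== PRECONDITION & SPEC =====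
-- Pre_ excludes exactly the inputs where Python A does not return: k = 0 (ZeroDivisionError)
-- and k < 0 with n > k and n % k ≠ 0 (the doubling loop never terminates).
def Pre_solve (n : Int) (k : Int) : Prop :=
  k ≠ 0 ∧ (0 < k ∨ n ≤ k ∨ PySem.Int.mod n k = 0)
instance (n : Int) (k : Int) : Decidable (Pre_solve n k) := by unfold Pre_solve; infer_instance

def pvWitness_solve : Int × Int := (10, 3)

def Spec_solve (n : Int) (k : Int) (out : Int) : Prop := out = solve_alt n k
instance (n : Int) (k : Int) (out : Int) : Decidable (Spec_solve n k out) := by unfold Spec_solve; infer_instance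

-- ===== CLAIM (what is proved, stated in full; the proofs are below) =====
def Claim_equal_solve : Prop := ∀ (n : Int) (k : Int), Dom_solve n k → Pre_solve n k → Spec_solve n k (solve n k)

-- ===== LEMMAS AND PROOFS =====

-- ceiling division via negated floor division, positive divisor
theorem ceil_fdiv_pos (a b : Int) (hb : 0 < b) :
    -(PySem.Int.floordiv (-a) b) =
      if PySem.Int.mod a b = 0 then PySem.Int.floordiv a b else PySem.Int.floordiv a b + 1 := by
  have hqr := PySem.Int.floordiv_mul_add_mod a b
  have hr0 := PySem.Int.mod_nonneg a hb
  have hrlt := PySem.Int.mod_lt a hb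
  rw [PySem.Int.neg_floordiv_neg_eq_iff_of_pos hb]
  split_ifs with h
  · constructor <;> nlinarith [hqr, hr0, hrlt]
  · have hrpos : 0 < PySem.Int.mod a b := lt_of_le_of_ne hr0 (Ne.symm h)
    constructor <;> nlinarith [hqr, hrpos, hrlt]

-- general divisor (b ≠ 0), by reduction to the positive case
theorem ceil_fdiv (a b : Int) (hb : b ≠ 0) :
    -(PySem.Int.floordiv (-a) b) =
      if PySem.Int.mod a b = 0 then PySem.Int.floordiv a b else PySem.Int.floordiv a b + 1 := by
  rcases lt_or_gt_of_ne hb with hneg | hpos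
  · have h1 : PySem.Int.floordiv (-a) b = PySem.Int.floordiv a (-b) := by
      rw [← PySem.Int.floordiv_neg_neg a (-b)]; ring_nf
    have h2 : PySem.Int.floordiv a b = PySem.Int.floordiv (-a) (-b) := by
      rw [← PySem.Int.floordiv_neg_neg (-a) (-b)]; ring_nf
    have h3 : PySem.Int.mod a b = 0 ↔ PySem.Int.mod (-a) (-b) = 0 := by
      rw [PySem.Int.mod_eq_zero_iff_dvd, PySem.Int.mod_eq_zero_iff_dvd]
      constructor <;> intro h <;> [exact (dvd_neg.mpr (neg_dvd.mpr h)); exact neg_dvd.mp (dvd_neg.mp h)]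
    rw [h1, h2]
    have := ceil_fdiv_pos (-a) (-b) (by omega)
    simp only [neg_neg] at this
    rw [this]
    split_ifs with hA hB hB
    · rfl
    · exact absurd (h3.mpr hA) hB
    · exact absurd (h3.mp hB) hA
    · rfl
  · exact ceil_fdiv_pos a b hpos

-- the doubling loop computes k * 2^j for the least j with n ≤ k * 2^j (k > 0)
theorem loopA_pow (n : Int) :
    ∀ (j : Nat) (k : Int), 0 < k → n ≤ k * 2 ^ j → (∀ i : Nat, i < j → k * 2 ^ i < n) →
      loopA n k = k * 2 ^ j := by
  intro j
  induction j with
  | zero =>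
    intro k hk hle _
    rw [loopA]
    simp only [pow_zero, mul_one] at hle ⊢
    have : ¬ (k < n ∧ 0 < k) := by omega
    simp [this]
  | succ j ih =>
    intro k hk hle hlt
    have h0 : k < n := by have := hlt 0 (Nat.succ_pos j); simpa using this
    rw [loopA]
    have hcond : k < n ∧ 0 < k := ⟨h0, hk⟩
    rw [dif_pos hcond]
    have := ih (k + k) (by omega) (by rw [show (k + k) * 2 ^ j = k * 2 ^ (j + 1) by ring]; exact hle)
      (fun i hi => by
        rw [show (k + k) * 2 ^ i = k * 2 ^ (i + 1) by ring]
        exact hlt (i + 1) (by omega))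
    rw [this]; ring

-- when the loop does not run
theorem loopA_id (n k : Int) (h : ¬ k < n) : loopA n k = k := by
  rw [loopA]
  have : ¬ (k < n ∧ 0 < k) := fun hc => h hc.1
  simp [this]

-- the loop result equals B's closed form, for 0 < k < n
theorem loopA_closed (n k : Int) (hk : 0 < k) (hkn : k < n) :
    loopA n k = k * 2 ^ PySem.Int.bitLength (-(PySem.Int.floordiv (-n) k) - 1) := by
  set q : Int := -(PySem.Int.floordiv (-n) k) with hq
  have hbr : (q - 1) * k < n ∧ n ≤ q * k :=
    (PySem.Int.neg_floordiv_neg_eq_iff_of_pos hk).mp hq.symm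
  have hq2 : 2 ≤ q := by
    by_contra h
    rw [not_le] at h
    have hle : q * k ≤ 1 * k := mul_le_mul_of_nonneg_right (by omega) hk.le
    linarith [hbr.2]
  set m : Nat := PySem.Int.bitLength (q - 1) with hm
  have hne : q - 1 ≠ 0 := by omega
  have hub : (q - 1).natAbs < 2 ^ m := PySem.Int.lt_two_pow_bitLength (q - 1)
  have hlb : 2 ^ (m - 1) ≤ (q - 1).natAbs := PySem.Int.two_pow_bitLength_le (q - 1) hne
  have hPZ : (((2 ^ m : Nat)) : Int) = (2 : Int) ^ m := by push_cast; ring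
  have hQZ : (((2 ^ (m - 1) : Nat)) : Int) = (2 : Int) ^ (m - 1) := by push_cast; ring
  have hubZ : q - 1 < (2 : Int) ^ m := by rw [← hPZ]; omega
  have hlbZ : (2 : Int) ^ (m - 1) ≤ q - 1 := by rw [← hQZ]; omega
  apply loopA_pow n m k hk
  · -- n ≤ k * 2^m : since q ≤ 2^m and n ≤ q*k
    have hq2m : q ≤ (2 : Int) ^ m := by omega
    have := mul_le_mul_of_nonneg_right hq2m hk.le
    linarith [hbr.2]
  · intro i hi
    -- k * 2^i < n : 2^i ≤ 2^(m-1) ≤ q-1 and (q-1)*k < n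
    have h2i : (2 : Int) ^ i ≤ 2 ^ (m - 1) := pow_le_pow_right₀ (by norm_num) (by omega)
    have := mul_le_mul_of_nonneg_left (le_trans h2i hlbZ) hk.le
    nlinarith [hbr.1]

-- ===== VERDICT (by name: the statement is the Claim_ definition above) =====
theorem solve_spec : Claim_equal_solve := by
  intro n k _hdom hpre
  unfold Spec_solve solve solve_alt
  rcases hpre with ⟨hk0, hrest⟩
  by_cases hguard : k == 1 || PySem.Int.mod n k == 0
  · simp [hguard]
  · rw [if_neg hguard, if_neg hguard]
    have hmodne : PySem.Int.mod n k ≠ 0 := by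
      intro h
      simp [h] at hguard
    have hn0 : n ≠ 0 := by
      intro h
      apply hmodne
      rw [h, PySem.Int.mod_eq_zero_iff_dvd]
      exact dvd_zero k
    simp only []
    by_cases hkn : k < n
    · have hkpos : 0 < k := by
        rcases hrest with h | h | h
        · exact h
        · omega
        · exact absurd h hmodne
      rw [if_pos hkn, loopA_closed n k hkpos hkn, ceil_fdiv _ n hn0]
      simp only [beq_iff_eq, zero_add]
    · rw [if_neg hkn, loopA_id n k hkn, ceil_fdiv _ n hn0]
      simp only [beq_iff_eq, zero_add]
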